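-- pv_equiv track=rewrite | github.com/jfan1256/algofacto | trade_live/class_live/live_pred.py | display_stock
-- ===== SOURCE A (Python) =====
-- import math
--
-- def display_stock(stocks, title):
--     n = len(stocks)
--     cols = int(math.sqrt(2 * n))
--     max_length = max([len(item[0]) for item in stocks])
--
--     text_content = f"{title}\n"
--     border_line = '+' + '-' * (max_length + 3) * cols + '+\n'
--
--     text_content += border_line
--     for i in range(n):
--         text_content += f"| {stocks[i][0].center(max_length)} "
--         if (i + 1) % cols == 0:
--             text_content += "|\n"
--             text_content += border_line
--     return text_content
-- ===== SOURCE B (Python) =====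
-- import math
--
-- def display_stock(stocks, title):
--     n = len(stocks)
--     cols = int(math.sqrt(2 * n))
--     max_length = max([len(item[0]) for item in stocks])
--     border_line = '+' + '-' * (max_length + 3) * cols + '+\n'
--
--     def rows(rest):
--         # render one row per call: a full row gets '|\n' + border, a short final row gets only its cells
--         if not rest:
--             return ''
--         row = rest[:cols]
--         body = ''.join('| ' + name.center(max_length) + ' ' for name, _ in row)
--         if len(row) == cols:
--             return body + '|\n' + border_line + rows(rest[cols:])
--         return body
--
--     return title + '\n' + border_line + rows(stocks)
-- ===== Notes on version B (the rewrite author's own statement) =====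
-- stated objective: alternative
-- what changed: B renders the grid row by row (one recursive call per chunk of cols names, joining the cells of each row) instead of A's single flat index loop that tests (i+1) % cols at every name; the modulus test disappears.
-- outside the precondition, e.g. on display_stock([], 'title'): A raises ValueError, B raises ValueError
import Mathlib
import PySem

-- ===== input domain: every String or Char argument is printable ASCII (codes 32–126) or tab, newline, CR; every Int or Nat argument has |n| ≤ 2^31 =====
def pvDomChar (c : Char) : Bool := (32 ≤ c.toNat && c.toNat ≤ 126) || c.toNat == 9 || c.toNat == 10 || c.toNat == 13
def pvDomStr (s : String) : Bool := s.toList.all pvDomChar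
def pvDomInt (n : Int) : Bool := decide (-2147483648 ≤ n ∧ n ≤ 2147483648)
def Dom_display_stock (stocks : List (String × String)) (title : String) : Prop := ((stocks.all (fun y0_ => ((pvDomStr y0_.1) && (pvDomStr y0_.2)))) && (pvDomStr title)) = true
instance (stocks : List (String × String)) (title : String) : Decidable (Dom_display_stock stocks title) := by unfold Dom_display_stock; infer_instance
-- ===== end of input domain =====

-- B renders the grid row by row (chunk of `cols` names per recursive call) instead of A's
-- single index loop with a modulus test; objective: alternative decomposition, same output.

-- ===== PORT A =====

-- s.center(w) with space fill, CPython's exact padding rule (left = marg//2 + (marg & w & 1));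
-- hand-ported (no PySem primitive), exact on all inputs; shared by both ports as a library helper.
def pyCenter (cs : List Char) (w : Nat) : List Char :=
  if w ≤ cs.length then cs
  else
    let marg := w - cs.length
    let left := marg / 2 + (marg &&& w &&& 1)
    List.replicate left ' ' ++ cs ++ List.replicate (marg - left) ' '

-- port of A; strings are built on the List Char side (PySem convention) and wrapped once.
-- int(math.sqrt (2*n)) is ported as Nat.sqrt (2*n): exact for n ≤ 2^31 (double sqrt rounds to isqrt there).
def display_stock (stocks : List (String × String)) (title : String) : String :=
  let n := stocks.length
  let cols := Nat.sqrt (2 * n)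
  -- max([...]) raises ValueError on an empty list: those inputs are excluded by Pre_; .getD 0 is never used inside Pre_
  let maxLength := (PySem.List.max? (stocks.map (fun item => item.1.toList.length)) (fun x => x)).getD 0
  let borderLine : List Char := '+' :: List.replicate ((maxLength + 3) * cols) '-' ++ ['+', '\n']
  let out := (stocks.zipIdx).foldl
    (fun acc pi =>
      let acc := acc ++ ('|' :: ' ' :: pyCenter pi.1.1.toList maxLength ++ [' '])
      if (pi.2 + 1) % cols = 0 then acc ++ '|' :: '\n' :: borderLine else acc)
    (title.toList ++ '\n' :: borderLine)
  String.ofList out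

-- ===== PORT B =====

-- one recursive call per row: take `c+1` (= cols) names, render the row, full rows get '|\n'+border
def rowsChars (c maxLength : Nat) (border : List Char) : List (String × String) → List Char
  | [] => []
  | x :: xs =>
    let row := (x :: xs).take (c+1)
    let body := (row.map (fun p => '|' :: ' ' :: pyCenter p.1.toList maxLength ++ [' '])).flatten
    if row.length = c+1 then
      body ++ '|' :: '\n' :: border ++ rowsChars c maxLength border ((x :: xs).drop (c+1))
    else body
  termination_by l => l.length
  decreasing_by simp

def display_stock_alt (stocks : List (String × String)) (title : String) : String :=
  let n := stocks.length
  let cols := Nat.sqrt (2 * n)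
  let maxLength := (PySem.List.max? (stocks.map (fun item => item.1.toList.length)) (fun x => x)).getD 0
  let borderLine : List Char := '+' :: List.replicate ((maxLength + 3) * cols) '-' ++ ['+', '\n']
  String.ofList (title.toList ++ '\n' :: borderLine ++ rowsChars (cols - 1) maxLength borderLine stocks)

-- ===== PRECONDITION & SPEC =====
-- Pre_ excludes only the empty list, on which A's max([...]) raises ValueError.
def Pre_display_stock (stocks : List (String × String)) (title : String) : Prop := stocks ≠ []
instance (stocks : List (String × String)) (title : String) : Decidable (Pre_display_stock stocks title) := by unfold Pre_display_stock; infer_instance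
def pvWitness_display_stock : (List (String × String)) × String := ([("AAPL", "x"), ("MSFT", "y"), ("GM", "z")], "Buy")

def Spec_display_stock (stocks : List (String × String)) (title : String) (out : String) : Prop := out = display_stock_alt stocks title
instance (stocks : List (String × String)) (title : String) (out : String) : Decidable (Spec_display_stock stocks title out) := by unfold Spec_display_stock; infer_instance

-- ===== CLAIM (what is proved, stated in full; the proofs are below) =====
def Claim_equal_display_stock : Prop := ∀ (stocks : List (String × String)) (title : String), Dom_display_stock stocks title → Pre_display_stock stocks title → Spec_display_stock stocks title (display_stock stocks title)

-- ===== LEMMAS AND PROOFS =====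

-- the cell a name is rendered as
def pvCell (maxLength : Nat) (p : String × String) : List Char :=
  '|' :: ' ' :: pyCenter p.1.toList maxLength ++ [' ']

-- A's loop body
def pvStep (c maxLength : Nat) (border : List Char) (acc : List Char) (pi : (String × String) × Nat) : List Char :=
  let acc := acc ++ pvCell maxLength pi.1
  if (pi.2 + 1) % (c+1) = 0 then acc ++ '|' :: '\n' :: border else acc

-- prefix of a row: no index triggers the border
lemma pv_noborder (c maxLength : Nat) (border : List Char) :
    ∀ (row : List (String × String)) (r : Nat) (acc : List Char),
      (∀ k < row.length, (r + k + 1) % (c+1) ≠ 0) →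
      (row.zipIdx r).foldl (pvStep c maxLength border) acc
        = acc ++ (row.map (pvCell maxLength)).flatten := by
  intro row
  induction row with
  | nil => intro r acc _h; simp
  | cons p t ih =>
    intro r acc h
    have h0 := h 0 (by simp)
    simp only [List.zipIdx_cons, List.foldl_cons, List.map_cons, List.flatten_cons]
    rw [show pvStep c maxLength border acc (p, r) = acc ++ pvCell maxLength p by
      simp [pvStep]; omega]
    rw [ih (r+1) (acc ++ pvCell maxLength p) (fun k hk => by
      have := h (k+1) (by simpa using Nat.succ_lt_succ hk)
      intro hc; exact this (by rw [← hc]; ring_nf)), List.append_assoc]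

-- a full row: exactly the last index triggers the border
lemma pv_fullrow (c maxLength : Nat) (border : List Char) :
    ∀ (row : List (String × String)) (r : Nat) (acc : List Char), row ≠ [] →
      (∀ k < row.length, ((r + k + 1) % (c+1) = 0 ↔ k + 1 = row.length)) →
      (row.zipIdx r).foldl (pvStep c maxLength border) acc
        = acc ++ (row.map (pvCell maxLength)).flatten ++ '|' :: '\n' :: border := by
  intro row
  induction row with
  | nil => intro _ _ h; exact absurd rfl h
  | cons p t ih =>
    intro r acc _ h
    simp only [List.zipIdx_cons, List.foldl_cons, List.map_cons, List.flatten_cons]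
    rcases t with _ | ⟨q, u⟩
    · have h0 := (h 0 (by simp)).2 (by simp)
      simp [pvStep, show (r + 1) % (c+1) = 0 by simpa using h0]
    · have h0 : (r + 0 + 1) % (c+1) ≠ 0 := by
        intro hc
        have := (h 0 (by simp)).1 hc
        simp at this
      rw [show pvStep c maxLength border acc (p, r) = acc ++ pvCell maxLength p by
        simp [pvStep]; omega]
      rw [ih (r+1) (acc ++ pvCell maxLength p) (by simp) (fun k hk => by
        have := h (k+1) (by simpa using Nat.succ_lt_succ hk)
        constructor
        · intro hc; have := this.1 (by rw [← hc]; ring_nf); simpa using this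
        · intro hl; have := this.2 (by simpa using hl); rw [← this]; ring_nf)]
      simp [List.append_assoc]

-- one-step unfolding of rowsChars with the lets reduced and cells named
lemma rowsChars_eq (c maxLength : Nat) (border : List Char) (l : List (String × String)) :
    rowsChars c maxLength border l =
      if l = [] then []
      else if (l.take (c+1)).length = c+1 then
        ((l.take (c+1)).map (pvCell maxLength)).flatten ++ '|' :: '\n' :: border
          ++ rowsChars c maxLength border (l.drop (c+1))
      else ((l.take (c+1)).map (pvCell maxLength)).flatten := by
  cases l with
  | nil => simp [rowsChars]
  | cons x xs =>
    rw [rowsChars]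
    simp [show pvCell maxLength = fun p => '|' :: ' ' :: pyCenter p.1.toList maxLength ++ [' '] from rfl]

-- the whole loop equals the row-by-row rendering, for any start index divisible by cols
lemma pv_loop_eq (c maxLength : Nat) (border : List Char) :
    ∀ (m : Nat) (l : List (String × String)), l.length ≤ m → ∀ (r : Nat) (acc : List Char),
      (c+1) ∣ r →
      (l.zipIdx r).foldl (pvStep c maxLength border) acc
        = acc ++ rowsChars c maxLength border l := by
  intro m
  induction m with
  | zero =>
    intro l hl r acc _
    have : l = [] := List.eq_nil_of_length_eq_zero (Nat.le_zero.mp hl)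
    subst this; simp [rowsChars]
  | succ m ih =>
    intro l hl r acc hdvd
    rcases l with _ | ⟨x, xs⟩
    · simp [rowsChars]
    obtain ⟨q, hq⟩ := hdvd
    rw [rowsChars_eq, if_neg (by simp)]
    by_cases hfull : c + 1 ≤ (x :: xs).length
    · -- full row, then the remaining rows
      have hlen : ((x :: xs).take (c+1)).length = c + 1 := by rw [List.length_take]; omega
      rw [if_pos hlen]
      conv_lhs => rw [show (x :: xs) = (x :: xs).take (c+1) ++ (x :: xs).drop (c+1) from
        (List.take_append_drop _ _).symm]
      rw [List.zipIdx_append, List.foldl_append, hlen]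
      rw [pv_fullrow c maxLength border _ r acc
        (by intro hnil; rw [hnil] at hlen; simp at hlen)
        (fun k hk => by
          rw [hlen] at hk ⊢
          conv_lhs => rw [show r + k + 1 = (c+1) * q + (k+1) by omega]
          rw [Nat.mul_add_mod]
          constructor
          · intro h0
            rcases Nat.lt_or_ge (k+1) (c+1) with h1 | h1
            · rw [Nat.mod_eq_of_lt h1] at h0; omega
            · omega
          · intro h0; rw [h0]; simp)]
      rw [ih ((x :: xs).drop (c+1))
        (by rw [List.length_drop]; simp only [List.length_cons] at hl ⊢; omega)
        (r + (c+1)) _ ⟨q + 1, by rw [hq]; ring⟩]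
      simp [List.append_assoc]
    · -- short final row, no border
      have htake : ((x :: xs).take (c+1)) = x :: xs := List.take_of_length_le (by omega)
      rw [htake, if_neg (by omega)]
      apply pv_noborder
      intro k hk h0
      conv_lhs at h0 => rw [show r + k + 1 = (c+1) * q + (k+1) by omega]
      rw [Nat.mul_add_mod, Nat.mod_eq_of_lt (by omega)] at h0
      omega

-- ===== VERDICT (by name: the statement is the Claim_ definition above) =====
theorem display_stock_spec : Claim_equal_display_stock := by
  intro stocks title _hdom hpre
  unfold Spec_display_stock
  simp only [display_stock, display_stock_alt]
  have hn : 1 ≤ stocks.length := by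
    rcases stocks with _ | _
    · exact absurd rfl hpre
    · simp
  obtain ⟨c, hc⟩ : ∃ c, Nat.sqrt (2 * stocks.length) = c + 1 := by
    have h1 : 1 ≤ Nat.sqrt (2 * stocks.length) := Nat.le_sqrt.mpr (by omega)
    exact ⟨Nat.sqrt (2 * stocks.length) - 1, by omega⟩
  rw [hc]
  simp only [Nat.add_sub_cancel]
  exact congrArg String.ofList
    ((pv_loop_eq c _ _ stocks.length stocks le_rfl 0 _ ⟨0, rfl⟩).trans (by simp))
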